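-- pv_equiv track=rewrite | github.com/pradibta4/Encrypt-Decrypt-Website | app/sbox_metrics.py | boolean_algebraic_degree
-- ===== SOURCE A (Python) =====
-- from typing import Dict, List
--
-- def boolean_algebraic_degree(truth_table: List[int]) -> int:
--     """Algebraic degree via Mobius transform of ANF."""
--     n = len(truth_table).bit_length() - 1
--     anf = truth_table[:]
--     for i in range(n):
--         step = 1 << i
--         for mask in range(len(anf)):
--             if mask & step:
--                 anf[mask] ^= anf[mask ^ step]
--     deg = 0
--     for mask, coeff in enumerate(anf):
--         if coeff:
--             wt = mask.bit_count()
--             if wt > deg: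
--                 deg = wt
--     return deg
-- ===== SOURCE B (Python) =====
-- def boolean_algebraic_degree(truth_table):
--     """Algebraic degree: each ANF coefficient is the XOR of the truth table
--     over the submasks of its mask, computed directly (no in-place transform)."""
--     deg = 0
--     for mask in range(len(truth_table)):
--         coeff = 0
--         sub = mask
--         while True:
--             coeff ^= truth_table[sub]
--             if sub == 0:
--                 break
--             sub = (sub - 1) & mask
--         if coeff and mask.bit_count() > deg:
--             deg = mask.bit_count()
--     return deg
-- ===== Notes on version B (the rewrite author's own statement) =====
-- stated objective: alternative
-- what changed: Replaces the in-place logarithmic-depth butterfly (Mobius transform) by a direct per-mask computation: each ANF coefficient is the XOR of the truth table over all submasks of the mask via the standard (s-1)&mask submask-enumeration loop, never mutating any array. Pre_ restricts to truth tables of power-of-two length (the natural domain: the truth table of an n-variable Boolean function), because A's value on other lengths is an artefact of its partial butterfly; …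
-- outside the precondition, e.g. on boolean_algebraic_degree([1, 1, 1]): A returns 1, B returns 0; on boolean_algebraic_degree([1, 2, 3, 4, 5, 6]): A returns 2, B returns 2
import Mathlib
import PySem

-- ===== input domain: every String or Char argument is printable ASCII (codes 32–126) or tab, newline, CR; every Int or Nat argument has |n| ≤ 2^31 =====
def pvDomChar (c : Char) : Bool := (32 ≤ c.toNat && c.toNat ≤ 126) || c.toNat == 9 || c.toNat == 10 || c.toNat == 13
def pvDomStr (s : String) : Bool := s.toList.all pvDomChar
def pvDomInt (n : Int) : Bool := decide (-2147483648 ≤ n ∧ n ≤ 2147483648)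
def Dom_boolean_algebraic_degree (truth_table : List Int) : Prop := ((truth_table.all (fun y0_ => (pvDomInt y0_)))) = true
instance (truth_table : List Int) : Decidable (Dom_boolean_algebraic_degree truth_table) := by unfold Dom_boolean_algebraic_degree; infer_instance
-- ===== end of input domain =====

-- B replaces A's in-place butterfly (Mobius transform) by a direct per-mask submask-enumeration
-- XOR; no speed claim (B is an alternative algorithm). Pre_ restricts to truth tables of
-- power-of-two length, the natural domain of the function.

-- ===== PORT A =====
-- one butterfly pass: 'for mask in range(len(anf)):  if mask & step: anf[mask] ^= anf[mask ^ step]'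
-- (all indices are in range in Python, so getD's default 0 is never used)
def pvBody (step : Nat) (b : List Int) (mask : Nat) : List Int :=
  if mask &&& step ≠ 0 then
    b.set mask (PySem.Int.bxor (b.getD mask 0) (b.getD (mask ^^^ step) 0))
  else b

def pvPassA (step : Nat) (a : List Int) : List Int :=
  (List.range a.length).foldl (pvBody step) a

-- 'for i in range(n): step = 1 << i; <pass>'
def pvIter (tt : List Int) (j : Nat) : List Int :=
  (List.range j).foldl (fun a i => pvPassA (2 ^ i) a) tt

def boolean_algebraic_degree (truth_table : List Int) : Int :=
  -- n = len(truth_table).bit_length() - 1 : Nat subtraction coincides (range of a negative is empty)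
  let n : Nat := PySem.Int.bitLength (truth_table.length : Int) - 1
  let anf : List Int := pvIter truth_table n
  (PySem.List.enumerate anf).foldl (fun deg mc =>
    if mc.2 ≠ 0 then
      let wt : Int := (PySem.Int.bitCount mc.1 : Int)
      if wt > deg then wt else deg
    else deg) 0

-- ===== PORT B =====
-- the submask loop: 'while True: coeff ^= truth_table[sub]; if sub == 0: break; sub = (sub - 1) & mask'
def pvSubXor (tt : List Int) (mask s : Nat) (coeff : Int) : Int :=
  if _h : s = 0 then PySem.Int.bxor coeff (tt.getD s 0)
  else pvSubXor tt mask ((s - 1) &&& mask) (PySem.Int.bxor coeff (tt.getD s 0))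
termination_by s
decreasing_by exact Nat.lt_of_le_of_lt Nat.and_le_left (by omega)

def boolean_algebraic_degree_alt (truth_table : List Int) : Int :=
  (List.range truth_table.length).foldl (fun deg mask =>
    let coeff := pvSubXor truth_table mask mask 0
    let w : Int := (PySem.Int.bitCount (mask : Int) : Int)
    if coeff ≠ 0 ∧ w > deg then w else deg) 0

-- ===== PRECONDITION & SPEC =====
-- Pre_ excludes truth tables whose length is not a power of two: such a list is not the truth
-- table of an n-variable Boolean function, and A's value there (a butterfly over only the low
-- bit_length(len)-1 bits) is an artefact of its in-place implementation; lengths 3 and 5 with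
-- distinct first two entries are additionally admitted, where that artefact provably cannot
-- affect the degree.
def Pre_boolean_algebraic_degree (truth_table : List Int) : Prop :=
  truth_table.length = 0 ∨ truth_table.length = 2 ^ Nat.log2 truth_table.length ∨
    ((truth_table.length = 3 ∨ truth_table.length = 5) ∧ truth_table.getD 0 0 ≠ truth_table.getD 1 0)
instance (truth_table : List Int) : Decidable (Pre_boolean_algebraic_degree truth_table) := by
  unfold Pre_boolean_algebraic_degree; infer_instance

def pvWitness_boolean_algebraic_degree : List Int := [1, 0, 1, 1]

def Spec_boolean_algebraic_degree (truth_table : List Int) (out : Int) : Prop := out = boolean_algebraic_degree_alt truth_table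
instance (truth_table : List Int) (out : Int) : Decidable (Spec_boolean_algebraic_degree truth_table out) := by unfold Spec_boolean_algebraic_degree; infer_instance

-- ===== CLAIM (what is proved, stated in full; the proofs are below) =====
def Claim_equal_boolean_algebraic_degree : Prop := ∀ (truth_table : List Int), Dom_boolean_algebraic_degree truth_table → Pre_boolean_algebraic_degree truth_table → Spec_boolean_algebraic_degree truth_table (boolean_algebraic_degree truth_table)

-- ===== LEMMAS AND PROOFS =====

-- ---- algebra of Python's int xor (PySem.Int.bxor) ----
def pvDec (s : Bool) (n : Nat) : Int := if s then -(n : Int) - 1 else (n : Int)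

theorem pvDec_bxor (s t : Bool) (m n : Nat) :
    PySem.Int.bxor (pvDec s m) (pvDec t n) = pvDec (s ^^ t) (m ^^^ n) := by
  cases s <;> cases t <;>
    simp [pvDec, PySem.Int.bxor] <;>
    omega

theorem pvDec_surj (a : Int) : ∃ s n, a = pvDec s n := by
  by_cases h : 0 ≤ a
  · exact ⟨false, a.toNat, by simp [pvDec]; omega⟩
  · exact ⟨true, (-a).toNat - 1, by simp [pvDec]; omega⟩

theorem pv_bxor_assoc (a b c : Int) :
    PySem.Int.bxor (PySem.Int.bxor a b) c = PySem.Int.bxor a (PySem.Int.bxor b c) := by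
  obtain ⟨sa, na, rfl⟩ := pvDec_surj a
  obtain ⟨sb, nb, rfl⟩ := pvDec_surj b
  obtain ⟨sc, nc, rfl⟩ := pvDec_surj c
  rw [pvDec_bxor, pvDec_bxor, pvDec_bxor, pvDec_bxor, Bool.xor_assoc, Nat.xor_assoc]

theorem pv_zero_bxor (a : Int) : PySem.Int.bxor 0 a = a := by
  rw [PySem.Int.bxor_comm, PySem.Int.bxor_zero]

-- ---- bit facts ----
theorem pv_and2p {m i : Nat} : (m &&& 2 ^ i ≠ 0) ↔ m.testBit i = true := by
  rw [Nat.and_two_pow]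
  cases h : m.testBit i <;> simp

theorem pv_tb_mod_true {m i : Nat} (h : m.testBit i = true) :
    m % 2 ^ (i + 1) = m % 2 ^ i + 2 ^ i := by
  have h1 : m % (2 ^ i * 2) = m % 2 ^ i + 2 ^ i * (m / 2 ^ i % 2) := Nat.mod_mul
  have h2 : m / 2 ^ i % 2 = 1 := by
    have h3 := Nat.testBit_eq_decide_div_mod_eq (x := m) (i := i)
    rw [h] at h3; simpa using h3.symm
  rw [pow_succ, h1, h2, Nat.mul_one]

theorem pv_tb_mod_false {m i : Nat} (h : m.testBit i = false) :
    m % 2 ^ (i + 1) = m % 2 ^ i := by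
  have h1 : m % (2 ^ i * 2) = m % 2 ^ i + 2 ^ i * (m / 2 ^ i % 2) := Nat.mod_mul
  have h2 : m / 2 ^ i % 2 = 0 := by
    have h3 := Nat.testBit_eq_decide_div_mod_eq (x := m) (i := i)
    rw [h] at h3
    have h4 : m / 2 ^ i % 2 < 2 := Nat.mod_lt _ (by norm_num)
    simp at h3; omega
  rw [pow_succ, h1, h2, Nat.mul_zero, Nat.add_zero]

theorem pv_xor_two_pow {m i : Nat} (hm : m.testBit i = true) : m ^^^ 2 ^ i = m - 2 ^ i := by
  have hd := Nat.div_add_mod m (2 ^ (i + 1))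
  have hqq : (2:Nat) ^ (i + 1) * (m / 2 ^ (i + 1)) = 2 ^ i * (2 * (m / 2 ^ (i + 1))) := by
    rw [pow_succ]; ring
  have hmm := pv_tb_mod_true hm
  have hblt : m % 2 ^ i < 2 ^ i := Nat.mod_lt _ (Nat.two_pow_pos i)
  have hm0 : m = 2 ^ i * (2 * (m / 2 ^ (i + 1))) + 2 ^ i + m % 2 ^ i := by omega
  have hm1 : m = 2 ^ i * (2 * (m / 2 ^ (i + 1)) + 1) + m % 2 ^ i := by
    rw [Nat.mul_add, Nat.mul_one]; omega
  have hm2 : m - 2 ^ i = 2 ^ i * (2 * (m / 2 ^ (i + 1))) + m % 2 ^ i := by omega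
  set q := m / 2 ^ (i + 1)
  set b := m % 2 ^ i
  apply Nat.eq_of_testBit_eq
  intro j
  rw [Nat.testBit_xor, hm2, Nat.testBit_two_pow_mul_add _ hblt j, Nat.testBit_two_pow]
  conv_lhs => rw [hm1, Nat.testBit_two_pow_mul_add _ hblt j]
  by_cases hj : j < i
  · simp [hj, show ¬(i = j) by omega]
  · by_cases hji : j = i
    · subst hji
      simp [show (2 * q + 1) % 2 = 1 by omega]
    · obtain ⟨k, hk⟩ : ∃ k, j - i = k + 1 := ⟨j - i - 1, by omega⟩
      simp only [hj, if_false, hk, Nat.testBit_add_one,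
        show (2 * q + 1) / 2 = q by omega, show 2 * q / 2 = q by omega,
        show (i = j) = False by simp; omega]
      simp

theorem pv_tb_two_pow_add {r k : Nat} (hr : r < 2 ^ k) (j : Nat) :
    (2 ^ k + r).testBit j = if j < k then r.testBit j else (1 : Nat).testBit (j - k) := by
  have := Nat.testBit_two_pow_mul_add 1 hr j
  simpa using this

theorem pv_H1 {x r k : Nat} (hx : x < 2 ^ k) (hr : r < 2 ^ k) :
    x &&& (2 ^ k + r) = x &&& r := by
  apply Nat.eq_of_testBit_eq
  intro j
  simp only [Nat.testBit_and, pv_tb_two_pow_add hr]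
  by_cases hj : j < k
  · simp [hj]
  · have hxj : x.testBit j = false :=
      Nat.testBit_eq_false_of_lt (lt_of_lt_of_le hx (Nat.pow_le_pow_right (by norm_num) (by omega)))
    simp [hj, hxj]

theorem pv_H2 {x r k : Nat} (hx : x < 2 ^ k) (hr : r < 2 ^ k) :
    (2 ^ k + x) &&& (2 ^ k + r) = 2 ^ k + (x &&& r) := by
  have hxr : x &&& r < 2 ^ k := lt_of_le_of_lt Nat.and_le_left hx
  apply Nat.eq_of_testBit_eq
  intro j
  simp only [Nat.testBit_and, pv_tb_two_pow_add hr, pv_tb_two_pow_add hx, pv_tb_two_pow_add hxr]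
  by_cases hj : j < k
  · simp [hj]
  · simp [hj]

-- ---- the butterfly, pointwise ----
theorem pv_pass_aux (i : Nat) (a : List Int) (k : Nat) (hk : k ≤ a.length) :
    (((List.range k).foldl (pvBody (2 ^ i)) a).length = a.length) ∧
    ∀ m, ((List.range k).foldl (pvBody (2 ^ i)) a).getD m 0 =
      if m < k ∧ m.testBit i then
        PySem.Int.bxor (a.getD m 0) (a.getD (m ^^^ 2 ^ i) 0)
      else a.getD m 0 := by
  induction k with
  | zero => simp
  | succ k ih =>
    obtain ⟨hlen, hval⟩ := ih (by omega)
    rw [List.range_succ, List.foldl_append, List.foldl_cons, List.foldl_nil]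
    set P := (List.range k).foldl (pvBody (2 ^ i)) a with hP
    by_cases hb : k.testBit i
    · have hbn : k &&& 2 ^ i ≠ 0 := pv_and2p.mpr hb
      have hPk : P.getD k 0 = a.getD k 0 := by
        rw [hval k]; simp
      have hkx : (k ^^^ 2 ^ i).testBit i = false := by
        simp [Nat.testBit_xor, hb]
      have hPkx : P.getD (k ^^^ 2 ^ i) 0 = a.getD (k ^^^ 2 ^ i) 0 := by
        rw [hval]; simp [hkx]
      constructor
      · simp [pvBody, hbn, hlen]
      · intro m
        simp only [pvBody, hbn, if_pos, ne_eq, not_false_iff]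
        by_cases hm : m = k
        · subst hm
          rw [List.getD_eq_getElem?_getD, List.getElem?_set_self (by omega), Option.getD_some,
              hPk, hPkx]
          simp [hb]
        · rw [List.getD_eq_getElem?_getD, List.getElem?_set_ne (by omega),
              ← List.getD_eq_getElem?_getD, hval m]
          have : (m < k + 1 ∧ m.testBit i) ↔ (m < k ∧ m.testBit i) := by
            constructor <;> rintro ⟨h1, h2⟩ <;> exact ⟨by omega, h2⟩
          split_ifs with h1 h2 h2 <;> first | rfl | (exfalso; tauto)
    · have hbn : ¬(k &&& 2 ^ i ≠ 0) := by
        simpa [pv_and2p] using hb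
      constructor
      · simp [pvBody, hbn, hlen]
      · intro m
        simp only [pvBody, hbn, if_false]
        rw [hval m]
        by_cases hm : m = k
        · subst hm; simp [hb]
        · have : (m < k + 1 ∧ m.testBit i) ↔ (m < k ∧ m.testBit i) := by
            constructor <;> rintro ⟨h1, h2⟩
            · exact ⟨by omega, h2⟩
            · exact ⟨by omega, h2⟩
          split_ifs with h1 h2 h2 <;> first | rfl | (exfalso; tauto)

theorem pv_pass_len (i : Nat) (a : List Int) : (pvPassA (2 ^ i) a).length = a.length :=
  (pv_pass_aux i a a.length (le_refl _)).1

theorem pv_pass_getD (i : Nat) (a : List Int) (m : Nat) (hm : m < a.length) :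
    (pvPassA (2 ^ i) a).getD m 0 =
      if m.testBit i then PySem.Int.bxor (a.getD m 0) (a.getD (m ^^^ 2 ^ i) 0)
      else a.getD m 0 := by
  have := (pv_pass_aux i a a.length (le_refl _)).2 m
  rw [pvPassA, this]
  simp [hm]

-- ---- proof-side value functions ----
-- value of anf[m] after the first i butterfly passes
def pvV (tt : List Int) : Nat → Nat → Int
  | m, 0 => tt.getD m 0
  | m, i + 1 =>
    if m &&& 2 ^ i ≠ 0 then PySem.Int.bxor (pvV tt m i) (pvV tt (m ^^^ 2 ^ i) i)
    else pvV tt m i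

-- XOR of tt over { hi + s : s a submask of c }
def pvC (tt : List Int) (hi c : Nat) : Int :=
  if h : c = 0 then tt.getD hi 0
  else
    PySem.Int.bxor (pvC tt (hi + 2 ^ Nat.log2 c) (c % 2 ^ Nat.log2 c))
                   (pvC tt hi (c % 2 ^ Nat.log2 c))
termination_by c
decreasing_by
  all_goals exact Nat.lt_of_lt_of_le (Nat.mod_lt c (Nat.two_pow_pos _)) (Nat.log2_self_le h)

-- proof-side offset variant of B's submask loop (hi is the fixed high part of the index)
def pvSX (tt : List Int) (hi sub s : Nat) (coeff : Int) : Int :=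
  if _h : s = 0 then PySem.Int.bxor coeff (tt.getD (hi + s) 0)
  else pvSX tt hi sub ((s - 1) &&& sub) (PySem.Int.bxor coeff (tt.getD (hi + s) 0))
termination_by s
decreasing_by exact Nat.lt_of_le_of_lt Nat.and_le_left (by omega)

theorem pv_subxor_eq_pvSX (tt : List Int) (mask : Nat) :
    ∀ s acc, pvSubXor tt mask s acc = pvSX tt 0 mask s acc := by
  intro s
  induction s using Nat.strong_induction_on with
  | _ s ih =>
    intro acc
    by_cases h0 : s = 0
    · subst h0; rw [pvSubXor, pvSX]; simp
    · rw [pvSubXor, pvSX, dif_neg h0, dif_neg h0, Nat.zero_add]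
      exact ih _ (Nat.lt_of_le_of_lt Nat.and_le_left (by omega)) _

theorem pv_iter_len (tt : List Int) (j : Nat) : (pvIter tt j).length = tt.length := by
  induction j with
  | zero => rfl
  | succ j ih =>
    rw [pvIter, List.range_succ, List.foldl_append, List.foldl_cons, List.foldl_nil]
    rw [pv_pass_len]; exact ih

theorem pv_iter_getD (tt : List Int) (j : Nat) :
    ∀ m, m < tt.length → (pvIter tt j).getD m 0 = pvV tt m j := by
  induction j with
  | zero => intro m hm; rfl
  | succ j ih =>
    intro m hm
    rw [pvIter, List.range_succ, List.foldl_append, List.foldl_cons, List.foldl_nil]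
    rw [show (List.range j).foldl (fun a i => pvPassA (2 ^ i) a) tt = pvIter tt j from rfl]
    rw [pv_pass_getD j (pvIter tt j) m (by rw [pv_iter_len]; omega)]
    by_cases hb : m.testBit j
    · have hxlt : m ^^^ 2 ^ j < tt.length := by
        rw [pv_xor_two_pow hb]
        exact Nat.lt_of_le_of_lt (Nat.sub_le _ _) hm
      rw [if_pos hb, ih m hm, ih (m ^^^ 2 ^ j) hxlt]
      simp only [pvV]
      rw [if_pos (pv_and2p.mpr hb)]
    · rw [if_neg hb, ih m hm]
      simp only [pvV]
      rw [if_neg (by simp [pv_and2p, hb])]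

theorem pv_log2_eq {c i : Nat} (h1 : 2 ^ i ≤ c) (h2 : c < 2 ^ (i + 1)) : Nat.log2 c = i := by
  rw [Nat.log2_eq_log_two]
  exact Nat.log_eq_of_pow_le_of_lt_pow h1 h2

theorem pv_V_eq_C (tt : List Int) (i : Nat) :
    ∀ m, pvV tt m i = pvC tt (m - m % 2 ^ i) (m % 2 ^ i) := by
  induction i with
  | zero =>
    intro m
    simp only [pvV, pow_zero, Nat.mod_one, Nat.sub_zero]
    rw [pvC]
    simp
  | succ i ih =>
    intro m
    have hlt : m % 2 ^ i < 2 ^ i := Nat.mod_lt _ (Nat.two_pow_pos i)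
    have hle1 : m % 2 ^ (i + 1) ≤ m := Nat.mod_le _ _
    have hle0 : m % 2 ^ i ≤ m := Nat.mod_le _ _
    by_cases hb : m.testBit i
    · have hmm := pv_tb_mod_true hb
      have hc2 : m % 2 ^ (i + 1) < 2 ^ (i + 1) := Nat.mod_lt _ (Nat.two_pow_pos _)
      have hcne : m % 2 ^ (i + 1) ≠ 0 := by omega
      have hlg : Nat.log2 (m % 2 ^ (i + 1)) = i := pv_log2_eq (by omega) hc2
      have hcr : m % 2 ^ (i + 1) % 2 ^ i = m % 2 ^ i := by
        rw [hmm, Nat.add_mod_right]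
        exact Nat.mod_eq_of_lt hlt
      have hx : m ^^^ 2 ^ i = m - 2 ^ i := pv_xor_two_pow hb
      have hq := Nat.div_add_mod m (2 ^ (i + 1))
      have hqq : (2:Nat) ^ (i + 1) * (m / 2 ^ (i + 1)) = 2 ^ i * (2 * (m / 2 ^ (i + 1))) := by
        rw [pow_succ]; ring
      have h6 : m - 2 ^ i = m % 2 ^ i + 2 ^ i * (2 * (m / 2 ^ (i + 1))) := by omega
      have hsub : (m - 2 ^ i) % 2 ^ i = m % 2 ^ i := by
        rw [h6, Nat.add_mul_mod_self_left]
        exact Nat.mod_eq_of_lt hlt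
      have hxm : (m ^^^ 2 ^ i) % 2 ^ i = m % 2 ^ i := by rw [hx, hsub]
      have hxh : (m ^^^ 2 ^ i) - (m ^^^ 2 ^ i) % 2 ^ i = m - m % 2 ^ (i + 1) := by
        rw [hx, hsub]; omega
      have hh : m - m % 2 ^ i = (m - m % 2 ^ (i + 1)) + 2 ^ i := by omega
      simp only [pvV]
      rw [if_pos (by exact pv_and2p.mpr hb), ih m, ih (m ^^^ 2 ^ i), hxh, hxm, hh]
      conv_rhs => rw [pvC]
      rw [dif_neg hcne, hlg, hcr]
    · have hmm := pv_tb_mod_false (by simpa using hb)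
      simp only [pvV]
      rw [if_neg (by simp [pv_and2p, hb]), ih m, hmm]

-- ---- the submask-enumeration loop computes pvC ----
theorem pv_M (tt : List Int) (k r : Nat) (hr : r < 2 ^ k) :
    ∀ s, s &&& r = s → ∀ hi acc, pvSX tt hi (2 ^ k + r) s acc = pvSX tt hi r s acc := by
  intro s
  induction s using Nat.strong_induction_on with
  | _ s ihs =>
    intro hs hi acc
    by_cases h0 : s = 0
    · subst h0
      conv_lhs => rw [pvSX]
      conv_rhs => rw [pvSX]
      simp
    · have hsr : s ≤ r := hs ▸ Nat.and_le_right
      have hslt : s - 1 < 2 ^ k := by omega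
      conv_lhs => rw [pvSX]
      conv_rhs => rw [pvSX]
      rw [dif_neg h0, dif_neg h0, pv_H1 hslt hr]
      exact ihs _ (Nat.lt_of_le_of_lt Nat.and_le_left (by omega))
        (by rw [Nat.and_assoc, Nat.and_self]) hi _

theorem pv_N (tt : List Int) (k r : Nat) (hr : r < 2 ^ k) :
    ∀ u, u &&& r = u → ∀ hi acc,
      pvSX tt hi (2 ^ k + r) (2 ^ k + u) acc =
        pvSX tt hi r r (pvSX tt (hi + 2 ^ k) r u acc) := by
  intro u
  induction u using Nat.strong_induction_on with
  | _ u ihu =>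
    intro hu hi acc
    have hpos : (0:Nat) < 2 ^ k := Nat.two_pow_pos k
    have hur : u ≤ r := hu ▸ Nat.and_le_right
    have hne : ¬(2 ^ k + u = 0) := by omega
    by_cases h0 : u = 0
    · subst h0
      have e1 : (2 ^ k + 0 - 1) &&& (2 ^ k + r) = r := by
        have h3 : (2:Nat) ^ k + 0 - 1 = 2 ^ k - 1 := by omega
        rw [h3, pv_H1 (by omega) hr, Nat.and_comm, Nat.and_two_pow_sub_one_eq_mod]
        exact Nat.mod_eq_of_lt hr
      have einner : pvSX tt (hi + 2 ^ k) r 0 acc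
          = PySem.Int.bxor acc (tt.getD (hi + (2 ^ k + 0)) 0) := by
        rw [pvSX]
        simp
      rw [einner]
      conv_lhs => rw [pvSX]
      rw [dif_neg hne, e1]
      exact pv_M tt k r hr r (by rw [Nat.and_self]) hi _
    · have e2 : (2 ^ k + u - 1) &&& (2 ^ k + r) = 2 ^ k + ((u - 1) &&& r) := by
        have h3 : 2 ^ k + u - 1 = 2 ^ k + (u - 1) := by omega
        rw [h3, pv_H2 (by omega) hr]
      have einner : pvSX tt (hi + 2 ^ k) r u acc
          = pvSX tt (hi + 2 ^ k) r ((u - 1) &&& r)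
              (PySem.Int.bxor acc (tt.getD (hi + (2 ^ k + u)) 0)) := by
        conv_lhs => rw [pvSX]
        rw [dif_neg h0, Nat.add_assoc]
      rw [einner]
      conv_lhs => rw [pvSX]
      rw [dif_neg hne, e2]
      exact ihu _ (Nat.lt_of_le_of_lt Nat.and_le_left (by omega))
        (by rw [Nat.and_assoc, Nat.and_self]) hi _

theorem pv_G (tt : List Int) : ∀ c hi acc,
    pvSX tt hi c c acc = PySem.Int.bxor acc (pvC tt hi c) := by
  intro c
  induction c using Nat.strong_induction_on with
  | _ c ihc =>
    intro hi acc
    by_cases h0 : c = 0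
    · subst h0
      rw [pvSX, pvC]
      simp
    · have h1 : 2 ^ Nat.log2 c ≤ c := Nat.log2_self_le h0
      have h2 : c < 2 ^ (Nat.log2 c + 1) := Nat.lt_log2_self
      have hpos : (0:Nat) < 2 ^ Nat.log2 c := Nat.two_pow_pos _
      have hr : c - 2 ^ Nat.log2 c < 2 ^ Nat.log2 c := by rw [pow_succ] at h2; omega
      have hcr : c = 2 ^ Nat.log2 c + (c - 2 ^ Nat.log2 c) := by omega
      have hmod : c % 2 ^ Nat.log2 c = c - 2 ^ Nat.log2 c := by
        rw [Nat.mod_eq_sub_mod h1]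
        exact Nat.mod_eq_of_lt hr
      have hrlt : c - 2 ^ Nat.log2 c < c := by omega
      calc pvSX tt hi c c acc
          = pvSX tt hi (2 ^ Nat.log2 c + (c - 2 ^ Nat.log2 c))
              (2 ^ Nat.log2 c + (c - 2 ^ Nat.log2 c)) acc := by rw [← hcr]
        _ = pvSX tt hi (c - 2 ^ Nat.log2 c) (c - 2 ^ Nat.log2 c)
              (pvSX tt (hi + 2 ^ Nat.log2 c) (c - 2 ^ Nat.log2 c) (c - 2 ^ Nat.log2 c) acc) :=
            pv_N tt _ _ hr _ (by rw [Nat.and_self]) hi acc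
        _ = PySem.Int.bxor (PySem.Int.bxor acc (pvC tt (hi + 2 ^ Nat.log2 c) (c - 2 ^ Nat.log2 c)))
              (pvC tt hi (c - 2 ^ Nat.log2 c)) := by
            rw [ihc _ hrlt, ihc _ hrlt]
        _ = PySem.Int.bxor acc (PySem.Int.bxor (pvC tt (hi + 2 ^ Nat.log2 c) (c - 2 ^ Nat.log2 c))
              (pvC tt hi (c - 2 ^ Nat.log2 c))) := pv_bxor_assoc _ _ _
        _ = PySem.Int.bxor acc (pvC tt hi c) := by
            conv_rhs => rw [pvC]
            rw [dif_neg h0, hmod]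

-- ---- assembly ----
theorem pv_bitLength_two_pow (k : Nat) : PySem.Int.bitLength ((2 ^ k : Nat) : Int) = k + 1 := by
  induction k with
  | zero => decide
  | succ k ih =>
    rw [PySem.Int.bitLength_natCast (Nat.two_pow_pos (k + 1))]
    rw [show (2:Nat) ^ (k + 1) / 2 = 2 ^ k from by rw [pow_succ]; omega, ih]

theorem pv_main (tt : List Int)
    (hpow : tt.length = 2 ^ Nat.log2 tt.length) :
    boolean_algebraic_degree tt = boolean_algebraic_degree_alt tt := by
  simp only [boolean_algebraic_degree, boolean_algebraic_degree_alt]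
  set k : Nat := Nat.log2 tt.length with hk
  have hnk : PySem.Int.bitLength (tt.length : Int) - 1 = k := by
    rw [hpow, pv_bitLength_two_pow]; omega
  rw [hnk]
  have hlen : (pvIter tt k).length = tt.length := pv_iter_len tt k
  rw [PySem.List.enumerate_eq_map_pyRange (d := 0), List.foldl_map]
  rw [show PySem.List.len (pvIter tt k) = ((tt.length : Nat) : Int) from by
        simp [PySem.List.len, hlen]]
  rw [PySem.List.pyRange_zero_natCast, List.foldl_map]
  apply PySem.List.foldl_congr_mem
  intro acc m hm
  have hmL : m < tt.length := List.mem_range.mp hm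
  have hmk : m % 2 ^ k = m := Nat.mod_eq_of_lt (hpow ▸ hmL)
  have hcoeff : PySem.List.pyGetD (pvIter tt k) (m : Int) 0 = pvSubXor tt m m 0 := by
    rw [PySem.List.pyGetD_natCast, pv_iter_getD tt k m hmL, pv_V_eq_C tt k m, hmk,
        Nat.sub_self, pv_subxor_eq_pvSX, pv_G, pv_zero_bxor]
  simp only [hcoeff]
  by_cases hc : pvSubXor tt m m 0 = 0 <;>
    by_cases hw : ((PySem.Int.bitCount (m : Int) : Int)) > acc <;>
      simp [hc, hw]


-- ---- the short non-power lengths admitted by Pre_ (3 and 5, first two entries distinct) ----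
theorem pv_bxor_eq_zero_iff (a b : Int) : PySem.Int.bxor a b = 0 ↔ a = b := by
  obtain ⟨sa, na, rfl⟩ := pvDec_surj a
  obtain ⟨sb, nb, rfl⟩ := pvDec_surj b
  rw [pvDec_bxor]
  cases sa <;> cases sb <;> simp [pvDec, Nat.xor_eq_zero_iff] <;> omega

theorem pvSubXor_zero (tt : List Int) (m : Nat) (acc : Int) :
    pvSubXor tt m 0 acc = PySem.Int.bxor acc (tt.getD 0 0) := by
  rw [pvSubXor]; simp

theorem pvSubXor_step (tt : List Int) (m s : Nat) (acc : Int) (h : ¬ s = 0) :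
    pvSubXor tt m s acc = pvSubXor tt m ((s - 1) &&& m) (PySem.Int.bxor acc (tt.getD s 0)) := by
  rw [pvSubXor, dif_neg h]

theorem pv_case3 (a b c : Int) (h : a ≠ b) :
    boolean_algebraic_degree [a, b, c] = boolean_algebraic_degree_alt [a, b, c] := by
  have hba : PySem.Int.bxor b a ≠ 0 := fun hz => h ((pv_bxor_eq_zero_iff b a).mp hz).symm
  simp only [boolean_algebraic_degree, boolean_algebraic_degree_alt]
  have hn : PySem.Int.bitLength (([a, b, c].length : Nat) : Int) - 1 = 1 := by
    simp; decide
  rw [hn]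
  have hiter : pvIter [a, b, c] 1 = [a, PySem.Int.bxor b a, c] := by
    simp [pvIter, pvPassA, pvBody, List.range_succ]
  rw [hiter]
  simp [PySem.List.enumerate_cons, PySem.List.enumerate_nil, List.range_succ,
    pvSubXor_step, pvSubXor_zero, pv_zero_bxor, hba,
    show PySem.Int.bitCount 1 = 1 from by decide, show PySem.Int.bitCount 2 = 1 from by decide]

theorem pv_case5 (a b c d e : Int) (h : a ≠ b) :
    boolean_algebraic_degree [a, b, c, d, e] = boolean_algebraic_degree_alt [a, b, c, d, e] := by
  have hba : PySem.Int.bxor b a ≠ 0 := fun hz => h ((pv_bxor_eq_zero_iff b a).mp hz).symm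
  simp only [boolean_algebraic_degree, boolean_algebraic_degree_alt]
  have hn : PySem.Int.bitLength (([a, b, c, d, e].length : Nat) : Int) - 1 = 2 := by
    simp; decide
  rw [hn]
  have hiter : pvIter [a, b, c, d, e] 2 =
      [a, PySem.Int.bxor b a, PySem.Int.bxor c a,
        PySem.Int.bxor (PySem.Int.bxor d c) (PySem.Int.bxor b a), e] := by
    simp [pvIter, pvPassA, pvBody, List.range_succ]
  rw [hiter]
  simp [PySem.List.enumerate_cons, PySem.List.enumerate_nil, List.range_succ,
    pvSubXor_step, pvSubXor_zero, pv_zero_bxor, hba, pv_bxor_assoc,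
    show PySem.Int.bitCount 1 = 1 from by decide, show PySem.Int.bitCount 2 = 1 from by decide,
    show PySem.Int.bitCount 3 = 2 from by decide, show PySem.Int.bitCount 4 = 1 from by decide]
  by_cases hX : PySem.Int.bxor d (PySem.Int.bxor c (PySem.Int.bxor b a)) = 0 <;> simp [hX]

-- ===== VERDICT (by name: the statement is the Claim_ definition above) =====
theorem boolean_algebraic_degree_spec : Claim_equal_boolean_algebraic_degree := by
  intro tt _ hpre
  unfold Spec_boolean_algebraic_degree
  cases tt with
  | nil => rfl
  | cons x xs =>
    rcases hpre with h | h | ⟨h35, hne01⟩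
    · simp at h
    · exact pv_main (x :: xs) h
    · rcases h35 with h3 | h5
      · match x, xs, h3 with
        | a, [b, c], _ => exact pv_case3 a b c (by simpa using hne01)
      · match x, xs, h5 with
        | a, [b, c, d, e], _ => exact pv_case5 a b c d e (by simpa using hne01)
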